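-- pv_equiv track=rewrite | github.com/pypi-data/pypi-mirror-400 | packages/metrics-computation-engine/metrics_computation_engine-1.2.7.tar.gz/metrics_computation_engine-1.2.7/src/metrics_computation_engine/metrics/session/cycles.py | count_contiguous_cycles
-- ===== SOURCE A (Python) =====
-- def count_contiguous_cycles(seq, min_cycle_len=2):
--     n = len(seq)
--     cycle_count = 0
--     i = 0
--     while i < n:
--         found_cycle = False
--         for k in range(min_cycle_len, (n - i) // 2 + 1):
--             if seq[i : i + k] == seq[i + k : i + 2 * k]:
--                 cycle_count += 1
--                 found_cycle = True
--                 i += k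
--                 break
--         if not found_cycle:
--             i += 1
--     return cycle_count
-- ===== SOURCE B (Python) =====
-- def count_contiguous_cycles(seq, min_cycle_len=2):
--     n = len(seq)
--     MOD = (1 << 61) - 1
--     BASE = 1000003
--     pw = [1]
--     H = [0]
--     pwv = 1
--     hv = 0
--     for x in seq:
--         pwv = pwv * BASE % MOD
--         hv = (hv * BASE + x) % MOD
--         pw.append(pwv)
--         H.append(hv)
--
--     def whash(a, b):
--         return (H[b] - H[a] * pw[b - a]) % MOD
--
--     count = 0
--     i = 0
--     while i < n:
--         step = 1
--         for k in range(min_cycle_len, (n - i) // 2 + 1):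
--             if whash(i, i + k) == whash(i + k, i + 2 * k) and seq[i:i + k] == seq[i + k:i + 2 * k]:
--                 count += 1
--                 step = k
--                 break
--         i += step
--     return count
-- ===== Notes on version B (the rewrite author's own statement) =====
-- stated objective: alternative
-- what changed: B precomputes polynomial rolling-hash prefix tables once and screens each candidate block pair with an O(1) hash comparison, confirming with the exact comparison only when the hashes agree, instead of A's building and comparing two fresh slices for every candidate k at every position.
import Mathlib
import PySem

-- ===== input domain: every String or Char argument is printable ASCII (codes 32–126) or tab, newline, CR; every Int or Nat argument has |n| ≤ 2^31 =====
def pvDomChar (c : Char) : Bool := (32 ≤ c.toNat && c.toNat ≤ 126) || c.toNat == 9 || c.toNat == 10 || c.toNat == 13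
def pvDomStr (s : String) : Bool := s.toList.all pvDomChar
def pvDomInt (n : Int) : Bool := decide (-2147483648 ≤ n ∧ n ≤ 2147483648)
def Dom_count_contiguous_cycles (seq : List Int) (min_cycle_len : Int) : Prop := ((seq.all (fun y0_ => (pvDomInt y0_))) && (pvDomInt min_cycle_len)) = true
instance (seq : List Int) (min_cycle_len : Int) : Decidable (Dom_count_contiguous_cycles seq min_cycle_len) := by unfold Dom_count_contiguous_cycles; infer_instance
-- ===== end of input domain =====

-- B screens each candidate block pair with a precomputed rolling-hash prefix table (exact
-- comparison only on a hash match) instead of A's fresh slice comparison per candidate.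

-- ===== PORT A =====
-- the while-loop of A; the inner for/break is the first k in range(min_cycle_len, (n-i)//2+1)
-- whose two adjacent slices compare equal.  fuel = n+1 suffices whenever min_cycle_len ≥ 1.
def cccA_loop (seq : List Int) (mcl n : Int) : Nat → Int → Int → Int
  | 0, _, cnt => cnt
  | fuel+1, i, cnt =>
    if i < n then
      match (PySem.List.pyRange mcl (PySem.Int.floordiv (n - i) 2 + 1) 1).find?
          (fun k => PySem.List.slice seq (some i) (some (i + k)) ==
                    PySem.List.slice seq (some (i + k)) (some (i + 2 * k))) with
      | some k => cccA_loop seq mcl n fuel (i + k) (cnt + 1)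
      | none => cccA_loop seq mcl n fuel (i + 1) cnt
    else cnt

def count_contiguous_cycles (seq : List Int) (min_cycle_len : Int) : Int :=
  cccA_loop seq min_cycle_len seq.length (seq.length.succ) 0 0

-- ===== PORT B =====
def pvMOD : Int := 2305843009213693951
def pvBASE : Int := 1000003

-- the body of B's precomputation loop: running power/hash plus the two appended tables
def pvUpd (s : Int × Int × List Int × List Int) (x : Int) : Int × Int × List Int × List Int :=
  let pwv := PySem.Int.mod (s.1 * pvBASE) pvMOD
  let hv := PySem.Int.mod (s.2.1 * pvBASE + x) pvMOD
  (pwv, hv, s.2.2.1 ++ [pwv], s.2.2.2 ++ [hv])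

def pvBuild (seq : List Int) : Int × Int × List Int × List Int :=
  seq.foldl pvUpd (1, 0, [1], [0])

-- whash(a, b) = (H[b] - H[a]*pw[b-a]) % MOD  (indices always in range at the call sites)
def pvWhash (H pw : List Int) (a b : Int) : Int :=
  PySem.Int.mod (PySem.List.pyGetD H b 0 - PySem.List.pyGetD H a 0 * PySem.List.pyGetD pw (b - a) 0) pvMOD

-- B's while-loop: the greedy scan, but a candidate k is accepted only after the
-- hash screen agrees AND the exact comparison confirms.
def cccB_loop (seq : List Int) (mcl n : Int) (H pw : List Int) : Nat → Int → Int → Int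
  | 0, _, cnt => cnt
  | fuel+1, i, cnt =>
    if i < n then
      match (PySem.List.pyRange mcl (PySem.Int.floordiv (n - i) 2 + 1) 1).find?
          (fun k => (pvWhash H pw i (i + k) == pvWhash H pw (i + k) (i + 2 * k)) &&
                    (PySem.List.slice seq (some i) (some (i + k)) ==
                     PySem.List.slice seq (some (i + k)) (some (i + 2 * k)))) with
      | some k => cccB_loop seq mcl n H pw fuel (i + k) (cnt + 1)
      | none => cccB_loop seq mcl n H pw fuel (i + 1) cnt
    else cnt

def count_contiguous_cycles_alt (seq : List Int) (min_cycle_len : Int) : Int :=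
  let st := pvBuild seq
  cccB_loop seq min_cycle_len seq.length st.2.2.2 st.2.2.1 (seq.length.succ) 0 0

-- ===== PRECONDITION & SPEC =====
-- Pre_ excludes min_cycle_len ≤ 0 with a nonempty seq: there the Python A never returns
-- (k = 0 makes the empty slices compare equal and i += 0 loops forever).
def Pre_count_contiguous_cycles (seq : List Int) (min_cycle_len : Int) : Prop :=
  seq = [] ∨ 1 ≤ min_cycle_len
instance (seq : List Int) (min_cycle_len : Int) : Decidable (Pre_count_contiguous_cycles seq min_cycle_len) := by unfold Pre_count_contiguous_cycles; infer_instance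

def pvWitness_count_contiguous_cycles : List Int × Int := ([1, 2, 1, 2], 2)

def Spec_count_contiguous_cycles (seq : List Int) (min_cycle_len : Int) (out : Int) : Prop := out = count_contiguous_cycles_alt seq min_cycle_len
instance (seq : List Int) (min_cycle_len : Int) (out : Int) : Decidable (Spec_count_contiguous_cycles seq min_cycle_len out) := by unfold Spec_count_contiguous_cycles; infer_instance

-- ===== CLAIM (what is proved, stated in full; the proofs are below) =====
def Claim_equal_count_contiguous_cycles : Prop := ∀ (seq : List Int) (min_cycle_len : Int), Dom_count_contiguous_cycles seq min_cycle_len → Pre_count_contiguous_cycles seq min_cycle_len → Spec_count_contiguous_cycles seq min_cycle_len (count_contiguous_cycles seq min_cycle_len)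

-- ===== LEMMAS AND PROOFS =====

def pvStep (a x : Int) : Int := PySem.Int.mod (a * pvBASE + x) pvMOD
def pvPoly (l : List Int) : Int := l.foldl pvStep 0
def pvPW (j : Nat) : Int := pvBASE ^ j % pvMOD
def pvInv (pre : List Int) : Int × Int × List Int × List Int :=
  (pvPW pre.length, pvPoly pre,
   (List.range (pre.length + 1)).map pvPW,
   (List.range (pre.length + 1)).map (fun j => pvPoly (pre.take j)))

theorem pvMOD_pos : (0:Int) < pvMOD := by norm_num [pvMOD]

theorem pv_mod_is_emod (a : Int) : PySem.Int.mod a pvMOD = a % pvMOD :=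
  PySem.Int.mod_eq_emod_of_pos pvMOD_pos

theorem pvStep_nonneg (a x : Int) : 0 ≤ pvStep a x := by
  rw [pvStep, pv_mod_is_emod]; exact Int.emod_nonneg _ (by norm_num [pvMOD])

theorem pvStep_lt (a x : Int) : pvStep a x < pvMOD := by
  rw [pvStep, pv_mod_is_emod]; exact Int.emod_lt_of_pos _ pvMOD_pos

theorem pv_foldl_bounds (l : List Int) : ∀ h : Int, 0 ≤ h → h < pvMOD →
    0 ≤ l.foldl pvStep h ∧ l.foldl pvStep h < pvMOD := by
  induction l with
  | nil => intro h h0 h1; exact ⟨h0, h1⟩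
  | cons x t ih =>
    intro h _ _
    exact ih (pvStep h x) (pvStep_nonneg h x) (pvStep_lt h x)

theorem pvPoly_nonneg (l : List Int) : 0 ≤ pvPoly l :=
  (pv_foldl_bounds l 0 le_rfl pvMOD_pos).1

theorem pvPoly_lt (l : List Int) : pvPoly l < pvMOD :=
  (pv_foldl_bounds l 0 le_rfl pvMOD_pos).2

theorem pv_foldl_shift (l : List Int) : ∀ h : Int, 0 ≤ h → h < pvMOD →
    l.foldl pvStep h = (h * pvBASE ^ l.length + pvPoly l) % pvMOD := by
  induction l with
  | nil =>
    intro h h0 h1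
    simp only [List.foldl_nil, List.length_nil, pow_zero, mul_one, pvPoly, add_zero]
    exact (Int.emod_eq_of_lt h0 h1).symm
  | cons x t ih =>
    intro h h0 h1
    have hx0 : (0:Int) ≤ pvStep h x := pvStep_nonneg h x
    have hx1 : pvStep h x < pvMOD := pvStep_lt h x
    have hz0 : (0:Int) ≤ pvStep 0 x := pvStep_nonneg 0 x
    have hz1 : pvStep 0 x < pvMOD := pvStep_lt 0 x
    have hP : pvPoly (x :: t) = (pvStep 0 x * pvBASE ^ t.length + pvPoly t) % pvMOD := by
      simpa [pvPoly] using ih (pvStep 0 x) hz0 hz1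
    simp only [List.foldl_cons, List.length_cons]
    rw [ih (pvStep h x) hx0 hx1, hP]
    have hstep : pvStep h x = (h * pvBASE + x) % pvMOD := by rw [pvStep, pv_mod_is_emod]
    have hzstep : pvStep 0 x = x % pvMOD := by
      rw [pvStep, pv_mod_is_emod]; ring_nf
    rw [hstep, hzstep]
    -- both sides are congruent to ((h*B + x) * B^|t| + pvPoly t) mod pvMOD
    show Int.ModEq pvMOD _ _
    calc (h * pvBASE + x) % pvMOD * pvBASE ^ t.length + pvPoly t
        ≡ (h * pvBASE + x) * pvBASE ^ t.length + pvPoly t [ZMOD pvMOD] := by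
          exact (Int.ModEq.mul_right _ (Int.emod_emod_of_dvd _ dvd_rfl)).add_right _
      _ = h * pvBASE ^ (t.length + 1) + (x * pvBASE ^ t.length + pvPoly t) := by ring
      _ ≡ h * pvBASE ^ (t.length + 1) + (x % pvMOD * pvBASE ^ t.length + pvPoly t) % pvMOD [ZMOD pvMOD] := by
          refine Int.ModEq.add_left _ ?_
          refine Int.ModEq.trans ?_ (Int.emod_emod_of_dvd _ dvd_rfl).symm
          exact (Int.ModEq.mul_right _ (Int.emod_emod_of_dvd _ dvd_rfl)).symm.add_right _

theorem pvUpd_inv (pre : List Int) (x : Int) : pvUpd (pvInv pre) x = pvInv (pre ++ [x]) := by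
  have hpw : PySem.Int.mod (pvPW pre.length * pvBASE) pvMOD = pvPW (pre.length + 1) := by
    rw [pv_mod_is_emod, pvPW, pvPW, pow_succ]
    conv_lhs => rw [Int.mul_emod]
    conv_rhs => rw [Int.mul_emod]
    rw [Int.emod_emod_of_dvd _ dvd_rfl]
  have hhv : PySem.Int.mod (pvPoly pre * pvBASE + x) pvMOD = pvPoly (pre ++ [x]) := by
    have hstep : pvPoly (pre ++ [x]) = pvStep (pvPoly pre) x := by
      simp [pvPoly, List.foldl_append]
    rw [hstep]; rfl
  have hlen : (pre ++ [x]).length = pre.length + 1 := by simp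
  unfold pvUpd pvInv
  simp only [hlen]
  refine Prod.ext ?_ (Prod.ext ?_ (Prod.ext ?_ ?_)) <;> simp only
  · exact hpw
  · exact hhv
  · rw [List.range_succ (n := pre.length + 1), List.map_append, List.map_singleton, hpw]
  · rw [List.range_succ (n := pre.length + 1), List.map_append, List.map_singleton]
    congr 1
    · refine List.map_congr_left ?_
      intro j hj
      have hj' : j ≤ pre.length := by
        have := List.mem_range.mp hj; omega
      rw [List.take_append_of_le_length hj']
    · rw [← hlen, List.take_length, hhv]

theorem pvBuild_inv (seq : List Int) : pvBuild seq = pvInv seq := by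
  have hnil : pvInv [] = (1, 0, [1], [0]) := by
    simp [pvInv, pvPoly, pvPW, List.range_succ]
    norm_num [pvMOD]
  have key : ∀ (l pre : List Int), l.foldl pvUpd (pvInv pre) = pvInv (pre ++ l) := by
    intro l
    induction l with
    | nil => intro pre; simp
    | cons x t ih =>
      intro pre
      simp only [List.foldl_cons, pvUpd_inv, ih (pre ++ [x]), List.append_assoc,
        List.singleton_append]
  have := key seq []
  simpa [pvBuild, hnil] using this

theorem pv_getD_map_range {f : Nat → Int} {m j : Nat} (hj : j < m) :
    ((List.range m).map f).getD j 0 = f j := by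
  rw [List.getD_eq_getElem?_getD]
  simp [hj]

theorem pvWhash_eq (seq : List Int) (a b : Nat) (hab : a ≤ b) (hbn : b ≤ seq.length) :
    pvWhash ((List.range (seq.length + 1)).map (fun j => pvPoly (seq.take j)))
            ((List.range (seq.length + 1)).map pvPW) (a : Int) (b : Int)
      = pvPoly ((seq.drop a).take (b - a)) := by
  have hba : (b : Int) - (a : Int) = ((b - a : Nat) : Int) := by omega
  rw [pvWhash, hba]
  rw [PySem.List.pyGetD_natCast, PySem.List.pyGetD_natCast, PySem.List.pyGetD_natCast]
  rw [pv_getD_map_range (by omega), pv_getD_map_range (by omega), pv_getD_map_range (by omega)]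
  set S := (seq.drop a).take (b - a) with hS
  have htake : seq.take b = seq.take a ++ S := by
    rw [hS, ← List.take_add]
    congr 1
    omega
  have hTb : (0:Int) ≤ pvPoly (seq.take a) := pvPoly_nonneg _
  have hTl : pvPoly (seq.take a) < pvMOD := pvPoly_lt _
  have hlenS : S.length = b - a := by
    rw [hS]
    simp [List.length_take, List.length_drop]
    omega
  have hpoly : pvPoly (seq.take b)
      = (pvPoly (seq.take a) * pvBASE ^ (b - a) + pvPoly S) % pvMOD := by
    rw [htake, pvPoly, List.foldl_append, ← pvPoly]
    rw [pv_foldl_shift S _ hTb hTl, hlenS, pvPoly]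
  rw [pv_mod_is_emod, hpoly, pvPW]
  set T := pvPoly (seq.take a)
  set k := b - a
  calc ((T * pvBASE ^ k + pvPoly S) % pvMOD - T * (pvBASE ^ k % pvMOD)) % pvMOD
      = ((T * pvBASE ^ k + pvPoly S) - T * pvBASE ^ k) % pvMOD := by
        rw [Int.sub_emod, Int.emod_emod_of_dvd _ dvd_rfl, Int.mul_emod T (pvBASE ^ k % pvMOD),
          Int.emod_emod_of_dvd _ dvd_rfl, ← Int.mul_emod, ← Int.sub_emod]
    _ = pvPoly S % pvMOD := by ring_nf
    _ = pvPoly S := Int.emod_eq_of_lt (pvPoly_nonneg S) (pvPoly_lt S)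

theorem pv_find?_congr {α : Type} (l : List α) (p q : α → Bool)
    (h : ∀ x ∈ l, p x = q x) : l.find? p = l.find? q := by
  induction l with
  | nil => rfl
  | cons x t ih =>
    simp only [List.find?_cons]
    rw [h x (by simp)]
    cases q x with
    | true => rfl
    | false => exact ih (fun y hy => h y (by simp [hy]))

theorem pv_pred_eq (seq : List Int) (i k : Int) (hi : 0 ≤ i) (hk : 1 ≤ k)
    (h2 : i + 2 * k ≤ (seq.length : Int)) :
    ((pvWhash ((List.range (seq.length + 1)).map (fun j => pvPoly (seq.take j)))
              ((List.range (seq.length + 1)).map pvPW) i (i + k)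
        == pvWhash ((List.range (seq.length + 1)).map (fun j => pvPoly (seq.take j)))
              ((List.range (seq.length + 1)).map pvPW) (i + k) (i + 2 * k)) &&
      (PySem.List.slice seq (some i) (some (i + k)) ==
       PySem.List.slice seq (some (i + k)) (some (i + 2 * k))))
    = (PySem.List.slice seq (some i) (some (i + k)) ==
       PySem.List.slice seq (some (i + k)) (some (i + 2 * k))) := by
  set a := i.toNat with ha
  set kn := k.toNat with hkn
  have hia : i = (a : Int) := by omega
  have hik : i + k = ((a + kn : Nat) : Int) := by push_cast; omega
  have hik2 : i + 2 * k = ((a + 2 * kn : Nat) : Int) := by push_cast; omega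
  have hlen : a + 2 * kn ≤ seq.length := by omega
  rw [hik2, hik, hia]
  rw [PySem.List.slice_natCast, PySem.List.slice_natCast]
  cases hs : ((seq.drop a).take (a + kn - a) == (seq.drop (a + kn)).take (a + 2 * kn - (a + kn))) with
  | false => simp
  | true =>
    have hseq : (seq.drop a).take (a + kn - a) = (seq.drop (a + kn)).take (a + 2 * kn - (a + kn)) :=
      beq_iff_eq.mp hs
    have hw1 := pvWhash_eq seq a (a + kn) (by omega) (by omega)
    have hw2 := pvWhash_eq seq (a + kn) (a + 2 * kn) (by omega) hlen
    rw [hw1, hw2, hseq]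
    simp

theorem pv_loops_eq (seq : List Int) (mcl : Int) (hm : 1 ≤ mcl) :
    ∀ (fuel : Nat) (i cnt : Int), 0 ≤ i →
      cccA_loop seq mcl seq.length fuel i cnt
        = cccB_loop seq mcl seq.length
            ((List.range (seq.length + 1)).map (fun j => pvPoly (seq.take j)))
            ((List.range (seq.length + 1)).map pvPW) fuel i cnt := by
  intro fuel
  induction fuel with
  | zero => intro i cnt _; rfl
  | succ f ih =>
    intro i cnt hi
    rw [cccA_loop, cccB_loop]
    by_cases hin : i < (seq.length : Int)
    · simp only [if_pos hin]
      have hfind : (PySem.List.pyRange mcl (PySem.Int.floordiv ((seq.length : Int) - i) 2 + 1) 1).find?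
            (fun k => (pvWhash ((List.range (seq.length + 1)).map (fun j => pvPoly (seq.take j)))
                  ((List.range (seq.length + 1)).map pvPW) i (i + k)
              == pvWhash ((List.range (seq.length + 1)).map (fun j => pvPoly (seq.take j)))
                  ((List.range (seq.length + 1)).map pvPW) (i + k) (i + 2 * k)) &&
              (PySem.List.slice seq (some i) (some (i + k)) ==
               PySem.List.slice seq (some (i + k)) (some (i + 2 * k))))
          = (PySem.List.pyRange mcl (PySem.Int.floordiv ((seq.length : Int) - i) 2 + 1) 1).find?
            (fun k => PySem.List.slice seq (some i) (some (i + k)) ==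
                      PySem.List.slice seq (some (i + k)) (some (i + 2 * k))) := by
        apply pv_find?_congr
        intro k hk
        obtain ⟨hk1, hk2⟩ := PySem.List.mem_pyRange_one.mp hk
        have hkpos : 1 ≤ k := le_trans hm hk1
        have hk2' : k ≤ PySem.Int.floordiv ((seq.length : Int) - i) 2 := by omega
        have hkb : k * 2 ≤ (seq.length : Int) - i :=
          (PySem.Int.le_floordiv_iff_mul_le (by norm_num)).mp hk2'
        exact pv_pred_eq seq i k hi hkpos (by omega)
      rw [hfind]
      cases hres : (PySem.List.pyRange mcl (PySem.Int.floordiv ((seq.length : Int) - i) 2 + 1) 1).find?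
            (fun k => PySem.List.slice seq (some i) (some (i + k)) ==
                      PySem.List.slice seq (some (i + k)) (some (i + 2 * k))) with
      | none => exact ih (i + 1) cnt (by omega)
      | some k =>
        have hkmem := List.mem_of_find?_eq_some hres
        have hk1 := (PySem.List.mem_pyRange_one.mp hkmem).1
        exact ih (i + k) (cnt + 1) (by omega)
    · simp only [if_neg hin]

-- ===== VERDICT (by name: the statement is the Claim_ definition above) =====
theorem count_contiguous_cycles_spec : Claim_equal_count_contiguous_cycles := by
  unfold Claim_equal_count_contiguous_cycles
  intro seq mcl _ hpre
  unfold Spec_count_contiguous_cycles count_contiguous_cycles count_contiguous_cycles_alt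
  rcases hpre with hnil | hm
  · subst hnil
    simp [cccA_loop, cccB_loop]
  · rw [pvBuild_inv]
    exact pv_loops_eq seq mcl hm seq.length.succ 0 0 le_rfl
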